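-- pv_equiv track=rewrite | github.com/dennis-wei/AdventCode2022 | python/8/run.py | score_vis
-- ===== SOURCE A (Python) =====
-- def score_vis(vis):
--     vis = vis[::]
--     score = 0
--     while True:
--         if len(vis) == 0:
--             break
--         next = vis.pop(0)
--         if next:
--             score += 1
--         else:
--             score += 1
--             break
--     return score
-- ===== SOURCE B (Python) =====
-- def score_vis(vis):
--     for i, v in enumerate(vis):
--         if not v:
--             return i + 1
--     return len(vis)
-- ===== Notes on version B (the rewrite author's own statement) =====
-- stated objective: simpler
-- what changed: Replaced the destructive while/pop(0) loop with a running counter by a single forward enumerate scan that returns index+1 at the first falsy element (or len(vis) if none).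
import Mathlib
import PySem

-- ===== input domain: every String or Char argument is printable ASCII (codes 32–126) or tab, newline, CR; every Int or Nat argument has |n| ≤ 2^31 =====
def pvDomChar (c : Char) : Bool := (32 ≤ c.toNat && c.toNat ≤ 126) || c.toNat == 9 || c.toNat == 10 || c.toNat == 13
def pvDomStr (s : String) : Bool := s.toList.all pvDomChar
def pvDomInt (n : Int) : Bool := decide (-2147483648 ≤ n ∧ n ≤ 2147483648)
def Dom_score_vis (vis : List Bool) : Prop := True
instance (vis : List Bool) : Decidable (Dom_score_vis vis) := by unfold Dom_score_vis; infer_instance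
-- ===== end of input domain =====

-- B replaces the while/pop(0) counting loop by one forward enumerate scan (simpler, non-destructive).
-- ===== PORT A =====
-- while-loop of A: pop the head, count, break at the first falsy (score includes it)
def scoreVisLoop : List Bool → Int → Int
  | [], score => score
  | next :: rest, score =>
    if next then scoreVisLoop rest (score + 1)
    else score + 1

def score_vis (vis : List Bool) : Int := scoreVisLoop vis 0

-- ===== PORT B =====
-- for i, v in enumerate(vis): return i+1 at the first falsy; else len(vis)
def score_vis_alt (vis : List Bool) : Int :=
  match (PySem.List.enumerate vis).find? (fun p => !p.2) with
  | some (i, _) => i + 1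
  | none => (vis.length : Int)

-- ===== PRECONDITION & SPEC =====
def Spec_score_vis (vis : List Bool) (out : Int) : Prop := out = score_vis_alt vis
instance (vis : List Bool) (out : Int) : Decidable (Spec_score_vis vis out) := by unfold Spec_score_vis; infer_instance

-- ===== CLAIM (what is proved, stated in full; the proofs are below) =====
def Claim_equal_score_vis : Prop := ∀ (vis : List Bool), Dom_score_vis vis → Spec_score_vis vis (score_vis vis)

-- ===== LEMMAS AND PROOFS =====
lemma scoreVisLoop_eq (vis : List Bool) (s : Int) (start : Int) :
    scoreVisLoop vis s =
      (match (PySem.List.enumerate vis start).find? (fun p => !p.2) with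
       | some (i, _) => s + (i - start) + 1
       | none => s + (vis.length : Int)) := by
  induction vis generalizing s start with
  | nil => simp [scoreVisLoop, PySem.List.enumerate]
  | cons v rest ih =>
    cases v with
    | true =>
      simp only [scoreVisLoop, PySem.List.enumerate_cons, List.find?_cons]
      simp only [Bool.not_true]
      rw [ih (s + 1) (start + 1)]
      cases h : (PySem.List.enumerate rest (start + 1)).find? (fun p => !p.2) with
      | none => simp; ring
      | some p => cases p; simp; ring
    | false =>
      simp [scoreVisLoop, PySem.List.enumerate_cons]

-- ===== VERDICT (by name: the statement is the Claim_ definition above) =====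
theorem score_vis_spec : Claim_equal_score_vis := by
  intro vis _
  unfold Spec_score_vis score_vis score_vis_alt
  rw [scoreVisLoop_eq vis 0 0]
  cases h : (PySem.List.enumerate vis 0).find? (fun p => !p.2) with
  | none => simp
  | some p => cases p; simp
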